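-- pv_equiv track=rewrite | github.com/TeogopK/Data_Structures_and_Algorithms_FMI | Exams/Seminar/Exam_05/Task1/py_solution.py | count_edges_in_areas
-- ===== SOURCE A (Python) =====
-- from collections import defaultdict
--
-- def dfs(current, visited, graph, results, unique_component):
--     for neighbor in graph[current]:
--         results[unique_component] += 1
--         if neighbor not in visited:
--             visited.add(neighbor)
--             dfs(neighbor, visited, graph, results, unique_component)
--
-- def count_edges_in_areas(graph):
--     unique_component = 0
--     visited = set()
--     results = defaultdict(int)
--
--     for vertex in graph:
--         if vertex in visited:
--             continue
--         visited.add(vertex)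
--         results[unique_component] = 0  # Lonely
--
--         dfs(vertex, visited, graph, results, unique_component)
--         results[unique_component] //= 2
--
--         unique_component += 1
--
--     return results
-- ===== SOURCE B (Python) =====
-- from collections import defaultdict
--
-- def count_edges_in_areas(graph):
--     # Phase 1: discover the components, collecting only their member lists.
--     visited = set()
--     components = []
--     for vertex in graph:
--         if vertex in visited:
--             continue
--         visited.add(vertex)
--         members = [vertex]
--         stack = [iter(graph[vertex])]
--         while stack:
--             w = next(stack[-1], None)
--             if w is None:
--                 stack.pop()
--             elif w not in visited:
--                 visited.add(w)
--                 members.append(w)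
--                 stack.append(iter(graph[w]))
--         components.append(members)
--     # Phase 2: one separate pass builds the result dict from the degree sums.
--     results = defaultdict(int)
--     for index, members in enumerate(components):
--         results[index] = sum(len(graph[v]) for v in members) // 2
--     return results
-- ===== Notes on version B (the rewrite author's own statement) =====
-- stated objective: alternative
-- what changed: Replaces A's recursive count-during-DFS (a defaultdict counter incremented once per scanned neighbour inside the recursion) by a two-phase algorithm: an iterative explicit-stack traversal that only collects each component's member list, and a completely separate enumerate pass that builds the result dict from the halved degree sums.
import Mathlib
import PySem

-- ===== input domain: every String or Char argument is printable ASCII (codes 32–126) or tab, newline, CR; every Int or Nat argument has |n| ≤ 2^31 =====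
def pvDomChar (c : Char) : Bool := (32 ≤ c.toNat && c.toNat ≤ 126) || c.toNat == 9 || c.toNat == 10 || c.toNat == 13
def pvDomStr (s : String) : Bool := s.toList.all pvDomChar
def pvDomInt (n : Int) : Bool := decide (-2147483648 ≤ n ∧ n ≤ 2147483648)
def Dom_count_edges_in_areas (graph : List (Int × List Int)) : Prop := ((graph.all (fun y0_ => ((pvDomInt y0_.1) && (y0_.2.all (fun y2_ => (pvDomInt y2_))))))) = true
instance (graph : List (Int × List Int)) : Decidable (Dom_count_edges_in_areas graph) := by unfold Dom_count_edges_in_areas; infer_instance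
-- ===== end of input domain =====

-- B replaces A's recursive count-during-DFS by a two-phase algorithm — an iterative explicit-stack
-- discovery pass that only collects component member lists, then a separate enumerate pass building
-- the result dict from halved degree sums (alternative decomposition, same asymptotic cost).


-- ===== PORT A =====
-- graph[v] (adjacency lookup in the dict); used by both ports
def pvNbrs (d : PySem.Dict Int (List Int)) (v : Int) : List Int := d.getD v []

-- fuel bound used by both ports: number of distinct vertices occurring in the dict
def pvFuel (d : PySem.Dict Int (List Int)) : Nat :=
  (PySem.Set.ofList (d.keys ++ d.values.flatten) : PySem.Set Int).length

-- A's recursive dfs: `results[uc] += 1` per scanned neighbour, recursing on unvisited neighbours.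
-- fuel is a totalisation guard only (recursion depth ≤ number of distinct vertices < pvFuel supplied).
def pvDfsA (d : PySem.Dict Int (List Int)) (fuel : Nat) (ws : List Int) (vis : PySem.Set Int)
    (res : PySem.Dict Int Int) (uc : Int) : PySem.Set Int × PySem.Dict Int Int :=
  match ws with
  | [] => (vis, res)
  | w :: ws' =>
    let res' := res.modify uc 0 (· + 1)
    if vis.contains w then pvDfsA d fuel ws' vis res' uc
    else
      match fuel with
      | 0 => (vis, res')  -- fuel guard only; unreachable for the fuel supplied by the port
      | fuel' + 1 =>
        let r := pvDfsA d fuel' (pvNbrs d w) (PySem.Set.add vis w) res' uc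
        pvDfsA d (fuel' + 1) ws' r.1 r.2 uc
termination_by (fuel, ws.length)

-- A's main loop over the dict's keys, state (unique_component, visited, results)
def pvStepA (d : PySem.Dict Int (List Int)) (st : Int × PySem.Set Int × PySem.Dict Int Int)
    (v : Int) : Int × PySem.Set Int × PySem.Dict Int Int :=
  let (uc, vis, res) := st
  if vis.contains v then (uc, vis, res)
  else
    let vis1 := PySem.Set.add vis v
    let res1 := res.insert uc 0
    let r := pvDfsA d (pvFuel d) (pvNbrs d v) vis1 res1 uc
    let res2 := r.2.insert uc (PySem.Int.floordiv (r.2.getD uc 0) 2)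
    (uc + 1, r.1, res2)

def count_edges_in_areas (graph : List (Int × List Int)) : List (Int × Int) :=
  let d := PySem.Dict.ofList graph
  (d.keys.foldl (pvStepA d) (0, PySem.Set.empty, PySem.Dict.empty)).2.2.items

-- ===== PORT B =====
-- B's while loop: an explicit stack of iterators (an iterator over a Python list = its remaining
-- suffix); collects the component's member list, no counting. fuel is a totalisation guard only
-- (one unit per push; unreachable for the fuel supplied).
def pvExplore (d : PySem.Dict Int (List Int)) (fuel : Nat) (frames : List (List Int))
    (vis : PySem.Set Int) (mem : List Int) : PySem.Set Int × List Int :=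
  match frames with
  | [] => (vis, mem)
  | [] :: fr => pvExplore d fuel fr vis mem
  | (w :: ws) :: fr =>
    if vis.contains w then pvExplore d fuel (ws :: fr) vis mem
    else
      match fuel with
      | 0 => (vis, mem)  -- fuel guard only
      | fuel' + 1 =>
        pvExplore d fuel' (pvNbrs d w :: ws :: fr) (PySem.Set.add vis w) (mem ++ [w])
termination_by (fuel, (frames.map (fun l => l.length + 1)).sum)

-- B phase 1: walk the dict's keys, collecting the list of component member lists
def pvComponents (d : PySem.Dict Int (List Int)) : List Int → PySem.Set Int → List (List Int)
  | [], _ => []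
  | v :: ks, vis =>
    if vis.contains v then pvComponents d ks vis
    else
      let r := pvExplore d (pvFuel d) [pvNbrs d v] (PySem.Set.add vis v) [v]
      r.2 :: pvComponents d ks r.1

-- B phase 2: `for index, members in enumerate(components): results[index] = sum(...) // 2`
-- (the enumerate counter is the explicit index argument)
def pvBuild (d : PySem.Dict Int (List Int)) :
    List (List Int) → Int → PySem.Dict Int Int → PySem.Dict Int Int
  | [], _, res => res
  | c :: cs, i, res =>
    pvBuild d cs (i + 1)
      (res.insert i (PySem.Int.floordiv ((c.map (fun v => PySem.List.len (pvNbrs d v))).sum) 2))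

def count_edges_in_areas_alt (graph : List (Int × List Int)) : List (Int × Int) :=
  let d := PySem.Dict.ofList graph
  (pvBuild d (pvComponents d d.keys PySem.Set.empty) 0 PySem.Dict.empty).items

-- ===== PRECONDITION & SPEC =====
-- Pre_ excludes exactly the graphs in which some listed neighbour is not a key of the dict:
-- there Python's `graph[neighbor]` raises KeyError (in A and in B alike).
def Pre_count_edges_in_areas (graph : List (Int × List Int)) : Prop :=
  ∀ p ∈ (PySem.Dict.ofList graph).items, ∀ w ∈ p.2, (PySem.Dict.ofList graph).contains w = true
instance (graph : List (Int × List Int)) : Decidable (Pre_count_edges_in_areas graph) := by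
  unfold Pre_count_edges_in_areas; infer_instance

def pvWitness_count_edges_in_areas : (List (Int × List Int)) := [(1, [2]), (2, [1]), (3, [])]

def Spec_count_edges_in_areas (graph : List (Int × List Int)) (out : List (Int × Int)) : Prop := out = count_edges_in_areas_alt graph
instance (graph : List (Int × List Int)) (out : List (Int × Int)) : Decidable (Spec_count_edges_in_areas graph out) := by unfold Spec_count_edges_in_areas; infer_instance

-- ===== CLAIM (what is proved, stated in full; the proofs are below) =====
def Claim_equal_count_edges_in_areas : Prop := ∀ (graph : List (Int × List Int)), Dom_count_edges_in_areas graph → Pre_count_edges_in_areas graph → Spec_count_edges_in_areas graph (count_edges_in_areas graph)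

-- ===== LEMMAS AND PROOFS =====

-- all vertices that can ever be marked: the dict's keys and every listed neighbour
def pvAll (d : PySem.Dict Int (List Int)) : PySem.Set Int :=
  PySem.Set.ofList (d.keys ++ d.values.flatten)

-- number of not-yet-visited vertices (the fuel potential)
def pvU (d : PySem.Dict Int (List Int)) (vis : PySem.Set Int) : Nat :=
  ((pvAll d).filter (fun v => !PySem.Set.contains vis v)).length

-- proof-only shadow of the traversal: same recursion as pvDfsA, returns the list of
-- newly marked vertices (in marking order) instead of the counter dict
def pvDfsC (d : PySem.Dict Int (List Int)) (fuel : Nat) (ws : List Int) (vis : PySem.Set Int) :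
    PySem.Set Int × List Int :=
  match ws with
  | [] => (vis, [])
  | w :: ws' =>
    if vis.contains w then pvDfsC d fuel ws' vis
    else
      match fuel with
      | 0 => (vis, [])
      | fuel' + 1 =>
        let r := pvDfsC d fuel' (pvNbrs d w) (PySem.Set.add vis w)
        let r2 := pvDfsC d (fuel' + 1) ws' r.1
        (r2.1, w :: (r.2 ++ r2.2))
termination_by (fuel, ws.length)

-- k-fold `results[uc] += 1`
def pvBump (res : PySem.Dict Int Int) (uc : Int) : Nat → PySem.Dict Int Int
  | 0 => res
  | k + 1 => (pvBump res uc k).modify uc 0 (· + 1)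

-- total number of neighbours of the vertices of a list
def pvCost (d : PySem.Dict Int (List Int)) (l : List Int) : Nat :=
  (l.map (fun v => (pvNbrs d v).length)).sum

-- one-step unfolding lemmas for the three traversal functions
lemma A_step_nil (d : PySem.Dict Int (List Int)) (f : Nat) (vis : PySem.Set Int)
    (res : PySem.Dict Int Int) (uc : Int) : pvDfsA d f [] vis res uc = (vis, res) := by
  conv_lhs => rw [pvDfsA.eq_def]

lemma A_step_skip (d : PySem.Dict Int (List Int)) (f : Nat) (w : Int) (ws : List Int)
    (vis : PySem.Set Int) (res : PySem.Dict Int Int) (uc : Int) (h : w ∈ vis) :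
    pvDfsA d f (w :: ws) vis res uc = pvDfsA d f ws vis (res.modify uc 0 (· + 1)) uc := by
  conv_lhs => rw [pvDfsA.eq_def]
  simp [PySem.Set.contains_eq_listContains, List.contains_eq_mem, h]

lemma A_step_go (d : PySem.Dict Int (List Int)) (f : Nat) (w : Int) (ws : List Int)
    (vis : PySem.Set Int) (res : PySem.Dict Int Int) (uc : Int) (h : w ∉ vis) :
    pvDfsA d (f + 1) (w :: ws) vis res uc =
      pvDfsA d (f + 1) ws
        (pvDfsA d f (pvNbrs d w) (PySem.Set.add vis w) (res.modify uc 0 (· + 1)) uc).1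
        (pvDfsA d f (pvNbrs d w) (PySem.Set.add vis w) (res.modify uc 0 (· + 1)) uc).2 uc := by
  conv_lhs => rw [pvDfsA.eq_def]
  simp [PySem.Set.contains_eq_listContains, List.contains_eq_mem, h]

lemma C_step_nil (d : PySem.Dict Int (List Int)) (f : Nat) (vis : PySem.Set Int) :
    pvDfsC d f [] vis = (vis, []) := by
  conv_lhs => rw [pvDfsC.eq_def]

lemma C_step_skip (d : PySem.Dict Int (List Int)) (f : Nat) (w : Int) (ws : List Int)
    (vis : PySem.Set Int) (h : w ∈ vis) :
    pvDfsC d f (w :: ws) vis = pvDfsC d f ws vis := by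
  conv_lhs => rw [pvDfsC.eq_def]
  simp [PySem.Set.contains_eq_listContains, List.contains_eq_mem, h]

lemma C_step_go (d : PySem.Dict Int (List Int)) (f : Nat) (w : Int) (ws : List Int)
    (vis : PySem.Set Int) (h : w ∉ vis) :
    pvDfsC d (f + 1) (w :: ws) vis =
      ((pvDfsC d (f + 1) ws (pvDfsC d f (pvNbrs d w) (PySem.Set.add vis w)).1).1,
        w :: ((pvDfsC d f (pvNbrs d w) (PySem.Set.add vis w)).2 ++
          (pvDfsC d (f + 1) ws (pvDfsC d f (pvNbrs d w) (PySem.Set.add vis w)).1).2)) := by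
  conv_lhs => rw [pvDfsC.eq_def]
  simp [PySem.Set.contains_eq_listContains, List.contains_eq_mem, h]

lemma C_step_zero (d : PySem.Dict Int (List Int)) (w : Int) (ws : List Int)
    (vis : PySem.Set Int) (h : w ∉ vis) :
    pvDfsC d 0 (w :: ws) vis = (vis, []) := by
  conv_lhs => rw [pvDfsC.eq_def]
  simp [PySem.Set.contains_eq_listContains, List.contains_eq_mem, h]

lemma B_step_done (d : PySem.Dict Int (List Int)) (f : Nat) (vis : PySem.Set Int)
    (mem : List Int) : pvExplore d f [] vis mem = (vis, mem) := by
  conv_lhs => rw [pvExplore.eq_def]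

lemma B_step_pop (d : PySem.Dict Int (List Int)) (f : Nat) (fr : List (List Int))
    (vis : PySem.Set Int) (mem : List Int) :
    pvExplore d f ([] :: fr) vis mem = pvExplore d f fr vis mem := by
  conv_lhs => rw [pvExplore.eq_def]

lemma B_step_skip (d : PySem.Dict Int (List Int)) (f : Nat) (w : Int) (ws : List Int)
    (fr : List (List Int)) (vis : PySem.Set Int) (mem : List Int) (h : w ∈ vis) :
    pvExplore d f ((w :: ws) :: fr) vis mem = pvExplore d f (ws :: fr) vis mem := by
  conv_lhs => rw [pvExplore.eq_def]
  simp [PySem.Set.contains_eq_listContains, List.contains_eq_mem, h]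

lemma B_step_push (d : PySem.Dict Int (List Int)) (f : Nat) (w : Int) (ws : List Int)
    (fr : List (List Int)) (vis : PySem.Set Int) (mem : List Int) (h : w ∉ vis) :
    pvExplore d (f + 1) ((w :: ws) :: fr) vis mem =
      pvExplore d f (pvNbrs d w :: ws :: fr) (PySem.Set.add vis w) (mem ++ [w]) := by
  conv_lhs => rw [pvExplore.eq_def]
  simp [PySem.Set.contains_eq_listContains, List.contains_eq_mem, h]

lemma pvFuel_eq (d : PySem.Dict Int (List Int)) : pvFuel d = (pvAll d).length := rfl

lemma mem_nbrs_all (d : PySem.Dict Int (List Int)) (v x : Int) (hx : x ∈ pvNbrs d v) :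
    x ∈ pvAll d := by
  unfold pvNbrs at hx
  rw [PySem.Dict.getD_eq_get?_getD] at hx
  cases hg : d.get? v with
  | none => rw [hg] at hx; simp at hx
  | some l =>
    rw [hg] at hx; simp at hx
    have hit : (v, l) ∈ d.items := PySem.Dict.mem_items_of_get?_eq_some d hg
    have hvals : l ∈ d.values := by
      show l ∈ d.items.map (·.2)
      exact List.mem_map.2 ⟨(v, l), hit, rfl⟩
    unfold pvAll
    rw [PySem.Set.mem_ofList]
    exact List.mem_append.2 (Or.inr (List.mem_flatten.2 ⟨l, hvals, hx⟩))

lemma u_le_fuel (d : PySem.Dict Int (List Int)) (vis : PySem.Set Int) :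
    pvU d vis ≤ pvFuel d := by
  rw [pvFuel_eq]
  exact List.length_filter_le _ _

lemma u_snoc (d : PySem.Dict Int (List Int)) (vis : PySem.Set Int) (x : Int)
    (hx : x ∈ pvAll d) (hnx : x ∉ vis) : pvU d (vis ++ [x]) + 1 = pvU d vis := by
  unfold pvU
  have hfilt : (pvAll d).filter (fun v => !PySem.Set.contains (vis ++ [x]) v) =
      ((pvAll d).filter (fun v => !PySem.Set.contains vis v)).filter (fun v => !(v == x)) := by
    rw [List.filter_filter]
    apply List.filter_congr
    intro v _
    by_cases hv : v = x <;> by_cases hm : v ∈ vis <;>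
      simp [hv, hm, PySem.Set.contains_eq_listContains, List.contains_eq_mem]
  rw [hfilt]
  have hxf : x ∈ (pvAll d).filter (fun v => !PySem.Set.contains vis v) := by
    refine List.mem_filter.2 ⟨hx, ?_⟩
    simp [PySem.Set.contains_eq_listContains, List.contains_eq_mem, hnx]
  have hnd : ((pvAll d).filter (fun v => !PySem.Set.contains vis v)).Nodup :=
    (PySem.Set.nodup_ofList _).filter _
  have herase : ((pvAll d).filter (fun v => !PySem.Set.contains vis v)).filter (fun v => !(v == x)) =
      ((pvAll d).filter (fun v => !PySem.Set.contains vis v)).erase x := by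
    rw [List.Nodup.erase_eq_filter hnd]
    exact List.filter_congr fun _ => congrFun rfl
  rw [herase, List.length_erase_of_mem hxf]
  have := List.length_pos_of_mem hxf
  omega

lemma u_pos (d : PySem.Dict Int (List Int)) (vis : PySem.Set Int) (x : Int)
    (hx : x ∈ pvAll d) (hnx : x ∉ vis) : 0 < pvU d vis := by
  have hxf : x ∈ (pvAll d).filter (fun v => !PySem.Set.contains vis v) := by
    refine List.mem_filter.2 ⟨hx, ?_⟩
    simp [PySem.Set.contains_eq_listContains, List.contains_eq_mem, hnx]
  exact List.length_pos_of_mem hxf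

lemma u_append (d : PySem.Dict Int (List Int)) (new : List Int) :
    ∀ (vis : PySem.Set Int), (vis ++ new).Nodup → (∀ x ∈ new, x ∈ pvAll d) →
    pvU d (vis ++ new) + new.length = pvU d vis := by
  induction new with
  | nil => intro vis _ _; simp
  | cons x new ih =>
    intro vis hnd hall
    have hassoc : vis ++ x :: new = (vis ++ [x]) ++ new := by simp
    have hnd' : ((vis ++ [x]) ++ new).Nodup := by rw [← hassoc]; exact hnd
    have hx : x ∉ vis := by
      rw [List.nodup_append] at hnd
      intro hmem
      exact hnd.2.2 x hmem x (by simp) rfl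
    have h1 := ih (vis ++ [x]) hnd' (fun y hy => hall y (List.mem_cons_of_mem _ hy))
    have h2 := u_snoc d vis x (hall x (by simp)) hx
    rw [hassoc]
    simp only [List.length_cons]
    omega

lemma C_struct (d : PySem.Dict Int (List Int)) : ∀ (fuel : Nat) (ws : List Int) (vis : PySem.Set Int),
    (∀ x ∈ ws, x ∈ pvAll d) → vis.Nodup →
    (pvDfsC d fuel ws vis).1 = vis ++ (pvDfsC d fuel ws vis).2
    ∧ (vis ++ (pvDfsC d fuel ws vis).2).Nodup
    ∧ (∀ x ∈ (pvDfsC d fuel ws vis).2, x ∈ pvAll d) := by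
  intro fuel
  induction fuel using Nat.strong_induction_on with
  | _ fuel IHf =>
  intro ws
  induction ws with
  | nil => intro vis hws hnd; simp [C_step_nil, hnd]
  | cons w ws' IHw =>
    intro vis hws hnd
    have hws' : ∀ x ∈ ws', x ∈ pvAll d := fun x hx => hws x (List.mem_cons_of_mem _ hx)
    by_cases hwm : w ∈ vis
    · rw [C_step_skip d fuel w ws' vis hwm]
      exact IHw vis hws' hnd
    · have hwall : w ∈ pvAll d := hws w (by simp)
      have hadd : PySem.Set.add vis w = vis ++ [w] := PySem.Set.add_of_not_mem hwm
      have hndadd : (PySem.Set.add vis w).Nodup := PySem.Set.nodup_add vis w hnd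
      cases fuel with
      | zero =>
        rw [C_step_zero d w ws' vis hwm]
        simp [hnd]
      | succ fuel' =>
        have hnbrs : ∀ x ∈ pvNbrs d w, x ∈ pvAll d := fun x hx => mem_nbrs_all d w x hx
        obtain ⟨e1, e2, e3⟩ := IHf fuel' (Nat.lt_succ_self _) (pvNbrs d w)
          (PySem.Set.add vis w) hnbrs hndadd
        rw [C_step_go d fuel' w ws' vis hwm]
        set r := pvDfsC d fuel' (pvNbrs d w) (PySem.Set.add vis w) with hrdef
        obtain ⟨f1, f2, f3⟩ := IHw r.1 hws' (by rw [e1]; exact e2)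
        set r2 := pvDfsC d (fuel' + 1) ws' r.1 with hr2def
        rw [hadd] at e1 e2
        refine ⟨?_, ?_, ?_⟩
        · show r2.1 = vis ++ (w :: (r.2 ++ r2.2))
          rw [f1, e1]; simp
        · show (vis ++ (w :: (r.2 ++ r2.2))).Nodup
          have := f2; rw [e1] at this; simpa using this
        · intro x hx
          simp only [List.mem_cons, List.mem_append] at hx
          rcases hx with rfl | hx | hx
          · exact hwall
          · exact e3 x hx
          · exact f3 x hx

lemma C_u (d : PySem.Dict Int (List Int)) (fuel : Nat) (ws : List Int) (vis : PySem.Set Int)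
    (hws : ∀ x ∈ ws, x ∈ pvAll d) (hnd : vis.Nodup) :
    pvU d (pvDfsC d fuel ws vis).1 + (pvDfsC d fuel ws vis).2.length = pvU d vis := by
  obtain ⟨h1, h2, h3⟩ := C_struct d fuel ws vis hws hnd
  rw [h1]
  exact u_append d _ vis h2 h3

lemma C_fuel (d : PySem.Dict Int (List Int)) :
    ∀ (n : Nat) (ws : List Int) (vis : PySem.Set Int) (f1 f2 : Nat),
    pvU d vis ≤ n → pvU d vis ≤ f1 → pvU d vis ≤ f2 →
    (∀ x ∈ ws, x ∈ pvAll d) → vis.Nodup →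
    pvDfsC d f1 ws vis = pvDfsC d f2 ws vis := by
  intro n
  induction n using Nat.strong_induction_on with
  | _ n IHn =>
  intro ws
  induction ws with
  | nil => intro vis f1 f2 _ _ _ _ _; rw [C_step_nil, C_step_nil]
  | cons w ws' IHw =>
    intro vis f1 f2 hn h1 h2 hws hnd
    have hws' : ∀ x ∈ ws', x ∈ pvAll d := fun x hx => hws x (List.mem_cons_of_mem _ hx)
    by_cases hwm : w ∈ vis
    · rw [C_step_skip d f1 w ws' vis hwm, C_step_skip d f2 w ws' vis hwm]
      exact IHw vis f1 f2 hn h1 h2 hws' hnd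
    · have hwall : w ∈ pvAll d := hws w (by simp)
      have hupos : 0 < pvU d vis := u_pos d vis w hwall hwm
      have hadd : PySem.Set.add vis w = vis ++ [w] := PySem.Set.add_of_not_mem hwm
      have hndadd : (PySem.Set.add vis w).Nodup := PySem.Set.nodup_add vis w hnd
      have huadd : pvU d (PySem.Set.add vis w) + 1 = pvU d vis := by
        rw [hadd]; exact u_snoc d vis w hwall hwm
      have hnbrs : ∀ x ∈ pvNbrs d w, x ∈ pvAll d := fun x hx => mem_nbrs_all d w x hx
      match f1, f2 with
      | 0, _ => omega
      | _ + 1, 0 => omega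
      | a + 1, b + 1 =>
        have hr : pvDfsC d a (pvNbrs d w) (PySem.Set.add vis w)
            = pvDfsC d b (pvNbrs d w) (PySem.Set.add vis w) :=
          IHn (n - 1) (by omega) _ _ a b (by omega) (by omega) (by omega) hnbrs hndadd
        have hCu := C_u d b (pvNbrs d w) (PySem.Set.add vis w) hnbrs hndadd
        have hCs := C_struct d b (pvNbrs d w) (PySem.Set.add vis w) hnbrs hndadd
        have hr2 : pvDfsC d (a + 1) ws' (pvDfsC d b (pvNbrs d w) (PySem.Set.add vis w)).1
            = pvDfsC d (b + 1) ws' (pvDfsC d b (pvNbrs d w) (PySem.Set.add vis w)).1 :=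
          IHn (n - 1) (by omega) ws' _ (a + 1) (b + 1) (by omega) (by omega) (by omega)
            hws' (by rw [hCs.1]; exact hCs.2.1)
        rw [C_step_go d a w ws' vis hwm, C_step_go d b w ws' vis hwm, hr, hr2]

lemma bump_modify (res : PySem.Dict Int Int) (uc : Int) (k : Nat) :
    pvBump (res.modify uc 0 (· + 1)) uc k = pvBump res uc (k + 1) := by
  induction k with
  | zero => rfl
  | succ k ih => show (pvBump (res.modify uc 0 (· + 1)) uc k).modify uc 0 (· + 1) = _
                 rw [ih]; rfl

lemma bump_add (res : PySem.Dict Int Int) (uc : Int) (a b : Nat) :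
    pvBump (pvBump res uc a) uc b = pvBump res uc (a + b) := by
  induction b with
  | zero => rfl
  | succ b ih => show (pvBump (pvBump res uc a) uc b).modify uc 0 (· + 1) = _
                 rw [ih]; rfl

lemma bump_insert (res : PySem.Dict Int Int) (uc : Int) (k : Nat) :
    pvBump (res.insert uc 0) uc k = res.insert uc (k : Int) := by
  induction k with
  | zero => rfl
  | succ k ih =>
    show (pvBump (res.insert uc 0) uc k).modify uc 0 (· + 1) = _
    rw [ih]
    show (res.insert uc (k : Int)).insert uc (((res.insert uc (k : Int)).getD uc 0) + 1) = _
    rw [PySem.Dict.getD_insert_self, PySem.Dict.insert_insert_self]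
    norm_num

lemma cost_cons (d : PySem.Dict Int (List Int)) (v : Int) (l : List Int) :
    pvCost d (v :: l) = (pvNbrs d v).length + pvCost d l := by simp [pvCost]

lemma cost_append (d : PySem.Dict Int (List Int)) (l1 l2 : List Int) :
    pvCost d (l1 ++ l2) = pvCost d l1 + pvCost d l2 := by simp [pvCost]

lemma A_eq (d : PySem.Dict Int (List Int)) :
    ∀ (n : Nat) (ws : List Int) (vis : PySem.Set Int) (res : PySem.Dict Int Int) (uc : Int) (f : Nat),
    pvU d vis ≤ n → pvU d vis ≤ f → (∀ x ∈ ws, x ∈ pvAll d) → vis.Nodup →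
    pvDfsA d f ws vis res uc =
      ((pvDfsC d f ws vis).1, pvBump res uc (ws.length + pvCost d (pvDfsC d f ws vis).2)) := by
  intro n
  induction n using Nat.strong_induction_on with
  | _ n IHn =>
  intro ws
  induction ws with
  | nil =>
    intro vis res uc f _ _ _ _
    rw [A_step_nil, C_step_nil]
    rfl
  | cons w ws' IHw =>
    intro vis res uc f hn hf hws hnd
    have hws' : ∀ x ∈ ws', x ∈ pvAll d := fun x hx => hws x (List.mem_cons_of_mem _ hx)
    by_cases hwm : w ∈ vis
    · have hstep := IHw vis (res.modify uc 0 (· + 1)) uc f hn hf hws' hnd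
      rw [A_step_skip d f w ws' vis res uc hwm, C_step_skip d f w ws' vis hwm, hstep, bump_modify]
      refine congrArg _ ?_
      congr 1
      simp only [List.length_cons]
      omega
    · have hwall : w ∈ pvAll d := hws w (by simp)
      have hupos : 0 < pvU d vis := u_pos d vis w hwall hwm
      have hadd : PySem.Set.add vis w = vis ++ [w] := PySem.Set.add_of_not_mem hwm
      have hndadd : (PySem.Set.add vis w).Nodup := PySem.Set.nodup_add vis w hnd
      have huadd : pvU d (PySem.Set.add vis w) + 1 = pvU d vis := by
        rw [hadd]; exact u_snoc d vis w hwall hwm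
      have hnbrs : ∀ x ∈ pvNbrs d w, x ∈ pvAll d := fun x hx => mem_nbrs_all d w x hx
      match f with
      | 0 => omega
      | f' + 1 =>
        have IH1 := IHn (n - 1) (by omega) (pvNbrs d w) (PySem.Set.add vis w)
          (res.modify uc 0 (· + 1)) uc f' (by omega) (by omega) hnbrs hndadd
        have hCu := C_u d f' (pvNbrs d w) (PySem.Set.add vis w) hnbrs hndadd
        have hCs := C_struct d f' (pvNbrs d w) (PySem.Set.add vis w) hnbrs hndadd
        set r := pvDfsC d f' (pvNbrs d w) (PySem.Set.add vis w) with hrdef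
        have IH2 := IHn (n - 1) (by omega) ws' r.1
          (pvBump (res.modify uc 0 (· + 1)) uc ((pvNbrs d w).length + pvCost d r.2))
          uc (f' + 1) (by omega) (by omega) hws' (by rw [hCs.1]; exact hCs.2.1)
        set r2 := pvDfsC d (f' + 1) ws' r.1 with hr2def
        rw [A_step_go d f' w ws' vis res uc hwm, C_step_go d f' w ws' vis hwm, ← hrdef,
          ← hr2def, IH1]
        dsimp only
        rw [IH2]
        refine congrArg _ ?_
        rw [bump_modify, bump_add]
        congr 1
        rw [cost_cons, cost_append]
        simp only [List.length_cons]
        omega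

lemma B_bridge (d : PySem.Dict Int (List Int)) :
    ∀ (n fuel : Nat) (ws : List Int) (fr : List (List Int)) (vis : PySem.Set Int) (mem : List Int),
    pvU d vis ≤ n → pvU d vis ≤ fuel → (∀ x ∈ ws, x ∈ pvAll d) → vis.Nodup →
    pvExplore d fuel (ws :: fr) vis mem =
      pvExplore d (fuel - (pvDfsC d fuel ws vis).2.length) fr (pvDfsC d fuel ws vis).1
        (mem ++ (pvDfsC d fuel ws vis).2) := by
  intro n
  induction n using Nat.strong_induction_on with
  | _ n IHn =>
  intro fuel ws
  induction ws generalizing fuel with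
  | nil =>
    intro fr vis mem _ _ _ _
    rw [B_step_pop, C_step_nil]
    simp
  | cons w ws' IHw =>
    intro fr vis mem hn hf hws hnd
    have hws' : ∀ x ∈ ws', x ∈ pvAll d := fun x hx => hws x (List.mem_cons_of_mem _ hx)
    by_cases hwm : w ∈ vis
    · rw [B_step_skip d fuel w ws' fr vis mem hwm, C_step_skip d fuel w ws' vis hwm]
      exact IHw fuel fr vis mem hn hf hws' hnd
    · have hwall : w ∈ pvAll d := hws w (by simp)
      have hupos : 0 < pvU d vis := u_pos d vis w hwall hwm
      have hadd : PySem.Set.add vis w = vis ++ [w] := PySem.Set.add_of_not_mem hwm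
      have hndadd : (PySem.Set.add vis w).Nodup := PySem.Set.nodup_add vis w hnd
      have huadd : pvU d (PySem.Set.add vis w) + 1 = pvU d vis := by
        rw [hadd]; exact u_snoc d vis w hwall hwm
      have hnbrs : ∀ x ∈ pvNbrs d w, x ∈ pvAll d := fun x hx => mem_nbrs_all d w x hx
      match fuel with
      | 0 => omega
      | f'' + 1 =>
        have h1 := IHn (n - 1) (by omega) f'' (pvNbrs d w) (ws' :: fr)
          (PySem.Set.add vis w) (mem ++ [w]) (by omega) (by omega) hnbrs hndadd
        have hCu1 := C_u d f'' (pvNbrs d w) (PySem.Set.add vis w) hnbrs hndadd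
        have hCs1 := C_struct d f'' (pvNbrs d w) (PySem.Set.add vis w) hnbrs hndadd
        set r1 := pvDfsC d f'' (pvNbrs d w) (PySem.Set.add vis w) with hr1def
        have hndr1 : r1.1.Nodup := by rw [hCs1.1]; exact hCs1.2.1
        have h2 := IHn (n - 1) (by omega) (f'' - r1.2.length) ws' fr r1.1
          (mem ++ [w] ++ r1.2) (by omega) (by omega) hws' hndr1
        have hCu2 := C_u d (f'' - r1.2.length) ws' r1.1 hws' hndr1
        have hfe : pvDfsC d (f'' - r1.2.length) ws' r1.1 = pvDfsC d (f'' + 1) ws' r1.1 :=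
          C_fuel d (pvU d r1.1) ws' r1.1 (f'' - r1.2.length) (f'' + 1)
            le_rfl (by omega) (by omega) hws' hndr1
        rw [hfe] at h2 hCu2
        set r2 := pvDfsC d (f'' + 1) ws' r1.1 with hr2def
        have harith : f'' + 1 - (w :: (r1.2 ++ r2.2)).length
            = f'' - r1.2.length - r2.2.length := by
          simp only [List.length_cons, List.length_append]
          omega
        have hmem2 : mem ++ [w] ++ r1.2 ++ r2.2 = mem ++ (w :: (r1.2 ++ r2.2)) := by simp
        rw [B_step_push d f'' w ws' fr vis mem hwm, C_step_go d f'' w ws' vis hwm, ← hr1def,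
          ← hr2def, h1, h2]
        dsimp only
        rw [harith, hmem2]

lemma cost_cast (d : PySem.Dict Int (List Int)) (l : List Int) :
    (l.map (fun x => PySem.List.len (pvNbrs d x))).sum = (pvCost d l : Int) := by
  induction l with
  | nil => rfl
  | cons x l ih => simp [pvCost, PySem.List.len_eq] at *; omega

-- main invariant: A's fold over the keys yields the dict B builds from the component lists
lemma fold_build (d : PySem.Dict Int (List Int)) :
    ∀ (ks : List Int) (vis : PySem.Set Int) (res : PySem.Dict Int Int) (uc : Int), vis.Nodup →
    (ks.foldl (pvStepA d) (uc, vis, res)).2.2 = pvBuild d (pvComponents d ks vis) uc res := by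
  intro ks
  induction ks with
  | nil => intro vis res uc _; rfl
  | cons v ks ih =>
    intro vis res uc hnd
    by_cases hwm : v ∈ vis
    · have hstep : pvStepA d (uc, vis, res) v = (uc, vis, res) := by
        simp [pvStepA, PySem.Set.contains_eq_listContains, List.contains_eq_mem, hwm]
      have hcomp : pvComponents d (v :: ks) vis = pvComponents d ks vis := by
        rw [pvComponents.eq_def]
        simp [PySem.Set.contains_eq_listContains, List.contains_eq_mem, hwm]
      rw [List.foldl_cons, hstep, hcomp]
      exact ih vis res uc hnd
    · have hndadd : (PySem.Set.add vis v).Nodup := PySem.Set.nodup_add vis v hnd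
      have hnbrs : ∀ x ∈ pvNbrs d v, x ∈ pvAll d := fun x hx => mem_nbrs_all d v x hx
      have hA := A_eq d (pvU d (PySem.Set.add vis v)) (pvNbrs d v) (PySem.Set.add vis v)
        (res.insert uc 0) uc (pvFuel d) le_rfl (u_le_fuel d _) hnbrs hndadd
      have hB := B_bridge d (pvU d (PySem.Set.add vis v)) (pvFuel d) (pvNbrs d v) []
        (PySem.Set.add vis v) [v] le_rfl (u_le_fuel d _) hnbrs hndadd
      rw [B_step_done] at hB
      have hCs := C_struct d (pvFuel d) (pvNbrs d v) (PySem.Set.add vis v) hnbrs hndadd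
      set C := pvDfsC d (pvFuel d) (pvNbrs d v) (PySem.Set.add vis v) with hCdef
      have hndC : C.1.Nodup := by rw [hCs.1]; exact hCs.2.1
      have hstep : pvStepA d (uc, vis, res) v =
          (uc + 1, C.1, res.insert uc (PySem.Int.floordiv
            (((pvNbrs d v).length + pvCost d C.2 : Nat) : Int) 2)) := by
        simp only [pvStepA, PySem.Set.contains_eq_listContains, List.contains_eq_mem, hwm,
          decide_false, Bool.false_eq_true, if_false]
        rw [hA]
        dsimp only
        rw [bump_insert, PySem.Dict.getD_insert_self, PySem.Dict.insert_insert_self]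
      have hcomp : pvComponents d (v :: ks) vis =
          ([v] ++ C.2) :: pvComponents d ks C.1 := by
        rw [pvComponents.eq_def]
        simp only [PySem.Set.contains_eq_listContains, List.contains_eq_mem, hwm,
          decide_false, Bool.false_eq_true, if_false]
        rw [hB]
      rw [List.foldl_cons, hstep, hcomp]
      have hbuild : pvBuild d (([v] ++ C.2) :: pvComponents d ks C.1) uc res =
          pvBuild d (pvComponents d ks C.1) (uc + 1)
            (res.insert uc (PySem.Int.floordiv
              ((([v] ++ C.2).map (fun x => PySem.List.len (pvNbrs d x))).sum) 2)) := rfl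
      rw [hbuild, cost_cast d ([v] ++ C.2)]
      have hcost : pvCost d ([v] ++ C.2) = (pvNbrs d v).length + pvCost d C.2 := by
        rw [List.singleton_append, cost_cons]
      rw [hcost]
      exact ih C.1 (res.insert uc (PySem.Int.floordiv
        (((pvNbrs d v).length + pvCost d C.2 : Nat) : Int) 2)) (uc + 1) hndC

-- ===== VERDICT (by name: the statement is the Claim_ definition above) =====
theorem count_edges_in_areas_spec : Claim_equal_count_edges_in_areas := by
  intro graph _ _
  show (((PySem.Dict.ofList graph).keys.foldl (pvStepA (PySem.Dict.ofList graph))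
      (0, PySem.Set.empty, PySem.Dict.empty)).2.2.items : List (Int × Int))
    = (pvBuild (PySem.Dict.ofList graph)
        (pvComponents (PySem.Dict.ofList graph) (PySem.Dict.ofList graph).keys PySem.Set.empty)
        0 PySem.Dict.empty).items
  rw [fold_build (PySem.Dict.ofList graph) _ PySem.Set.empty PySem.Dict.empty 0 List.nodup_nil]
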